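-- pv_equiv track=rewrite | github.com/harshbopaliya/MinutesX | MinutesX/agents/action_agent.py | _resolve_owners
-- ===== SOURCE A (Python) =====
-- from typing import Any, Dict, List, Optional
--
-- def _resolve_owners(
--
--     action_items: List[Dict[str, Any]],
--     participants: List[str],
-- ) -> List[Dict[str, Any]]:
--     """
--     Resolve owner names to match participant list.
--
--     Uses fuzzy matching to find best participant match.
--     """
--     participant_lower = {p.lower(): p for p in participants}
--
--     for item in action_items:
--         owner = item.get("owner", "").lower()
--
--         if owner in participant_lower:
--             item["owner"] = participant_lower[owner]
--         else:
--             # Try partial match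
--             for p_lower, p_original in participant_lower.items():
--                 if owner in p_lower or p_lower in owner:
--                     item["owner"] = p_original
--                     break
--             else:
--                 # Check for first name match
--                 owner_first = owner.split()[0] if owner else ""
--                 for p_lower, p_original in participant_lower.items():
--                     if owner_first and owner_first in p_lower.split()[0]:
--                         item["owner"] = p_original
--                         break
--
--     return action_items
-- ===== SOURCE B (Python) =====
-- from typing import Any, Dict, List
--
--
-- def _resolve_owners(
--     action_items: List[Dict[str, Any]],
--     participants: List[str],
-- ) -> List[Dict[str, Any]]:
--     """
--     Resolve owner names to match participant list (single-scan fuzzy matching).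
--
--     Note: mutates the item dicts in place, like the original.
--     """
--     participant_lower = {p.lower(): p for p in participants}
--
--     for item in action_items:
--         owner = item.get("owner", "").lower()
--
--         if owner in participant_lower:
--             item["owner"] = participant_lower[owner]
--             continue
--
--         owner_parts = owner.split()
--         owner_first = owner_parts[0] if owner_parts else ""
--         sub_cand = None
--         first_cand = None
--         for p_lower, p_original in participant_lower.items():
--             if owner in p_lower or p_lower in owner:
--                 sub_cand = p_original
--                 break
--             if first_cand is None and owner_first:
--                 p_parts = p_lower.split()
--                 if p_parts and owner_first in p_parts[0]:
--                     first_cand = p_original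
--
--         if sub_cand is not None:
--             item["owner"] = sub_cand
--         elif first_cand is not None:
--             item["owner"] = first_cand
--
--     return action_items
-- ===== Notes on version B (the rewrite author's own statement) =====
-- stated objective: simpler
-- what changed: The two sequential fuzzy-match scans (substring for/else, then first-name loop) are merged into one pass over the participant dict that records a first substring candidate and a first first-name candidate in two slots, assigning the substring candidate with priority after the scan.
-- crash fix: A raises IndexError when an item's non-empty owner has no exact or substring participant match and either the owner is whitespace-only (owner.split()[0]) or a whitespace-only participant key is scanned before the first first-name match (p_lower.split()[0]); B guards both splits and returns the item with its owner unchanged (or the first-name match if one exists). — e.g. on _resolve_owners([[("owner", " ")]], ["qq"]): A raises IndexError, B returns [[("owner", " ")]]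
import Mathlib
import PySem

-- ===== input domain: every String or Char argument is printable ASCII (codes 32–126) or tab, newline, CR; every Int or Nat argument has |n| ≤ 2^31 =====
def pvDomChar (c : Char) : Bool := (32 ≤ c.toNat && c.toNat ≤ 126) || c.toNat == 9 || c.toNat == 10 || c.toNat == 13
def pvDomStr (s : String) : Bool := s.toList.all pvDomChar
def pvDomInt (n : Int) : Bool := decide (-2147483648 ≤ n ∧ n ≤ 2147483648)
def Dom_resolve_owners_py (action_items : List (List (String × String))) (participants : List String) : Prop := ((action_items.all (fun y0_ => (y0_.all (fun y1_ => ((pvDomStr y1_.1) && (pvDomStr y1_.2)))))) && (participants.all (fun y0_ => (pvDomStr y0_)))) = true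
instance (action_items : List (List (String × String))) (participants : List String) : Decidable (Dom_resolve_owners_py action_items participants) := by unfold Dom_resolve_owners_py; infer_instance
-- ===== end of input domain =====

-- B merges A's two sequential fuzzy-match scans into one pass keeping two candidate slots
-- (objective: simpler decomposition; same cost). A mutates the item dicts in place and
-- returns the same list; B performs the same mutation — the equivalence proved is about the
-- returned value.


-- ===== PORT A =====
-- literal port of _resolve_owners: exact lookup, then the substring for/else scan,
-- then the first-name scan. Python's `x in s` is PySem.Str.isIn; `s.split()[0]` is
-- ported as (split₀ s).headD "" — exact wherever Python does not raise; the inputs on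
-- which Python's [0] raises IndexError are excluded by Pre_ below.
def resolve_owners_py (action_items : List (List (String × String))) (participants : List String) : List (List (String × String)) :=
  let plower : PySem.Dict String String :=
    participants.foldl (fun d p => d.insert (PySem.Str.lower p) p) PySem.Dict.empty
  action_items.map (fun item =>
    let d := PySem.Dict.mk item
    let owner := PySem.Str.lower (d.getD "owner" "")
    match plower.get? owner with
    | some v => (d.insert "owner" v).items
    | none =>
      match plower.items.find? (fun kv => PySem.Str.isIn owner kv.1 || PySem.Str.isIn kv.1 owner) with
      | some kv => (d.insert "owner" kv.2).items
      | none =>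
        let owner_first := if owner ≠ "" then (PySem.Str.split₀ owner).headD "" else ""
        match plower.items.find? (fun kv => (owner_first != "") && PySem.Str.isIn owner_first ((PySem.Str.split₀ kv.1).headD "")) with
        | some kv => (d.insert "owner" kv.2).items
        | none => item)

-- ===== PORT B =====
-- port of Source B: one scan over the participant dict, breaking on a substring hit while
-- tracking the first first-name candidate seen so far (with Source B's explicit guards on both
-- splits, so B never raises). pvScanB is the for-loop of Source B: it returns
-- (sub_cand, first_cand) at loop exit (break sets sub_cand and stops).
def pvScanB (owner owner_first : String) (first_cand : Option String) :
    List (String × String) → Option String × Option String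
  | [] => (none, first_cand)
  | kv :: rest =>
    if PySem.Str.isIn owner kv.1 || PySem.Str.isIn kv.1 owner then
      (some kv.2, first_cand)
    else
      pvScanB owner owner_first
        (if first_cand.isNone && (owner_first != "") then
          match PySem.Str.split₀ kv.1 with
          | [] => first_cand
          | h :: _ => if PySem.Str.isIn owner_first h then some kv.2 else first_cand
        else first_cand)
        rest

def resolve_owners_py_alt (action_items : List (List (String × String))) (participants : List String) : List (List (String × String)) :=
  let plower : PySem.Dict String String :=
    participants.foldl (fun d p => d.insert (PySem.Str.lower p) p) PySem.Dict.empty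
  action_items.map (fun item =>
    let d := PySem.Dict.mk item
    let owner := PySem.Str.lower (d.getD "owner" "")
    match plower.get? owner with
    | some v => (d.insert "owner" v).items
    | none =>
      let owner_first := (PySem.Str.split₀ owner).headD ""
      let cands := pvScanB owner owner_first none plower.items
      match cands.1 with
      | some v => (d.insert "owner" v).items
      | none =>
        match cands.2 with
        | some v => (d.insert "owner" v).items
        | none => item)

-- ===== PRECONDITION & SPEC =====
-- Per-item condition under which Python A raises IndexError: non-empty owner with no exact
-- and no substring match, and either the owner is whitespace-only (owner.split()[0]) or the
-- first whitespace-only participant key precedes the first first-name match in scan order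
-- (p_lower.split()[0]).
def pvWsBeforeMatch (owner_first : String) (L : List String) : Bool :=
  match L.findIdx? (fun k => PySem.Str.split₀ k == []) with
  | none => false
  | some i =>
    match L.findIdx? (fun k => PySem.Str.isIn owner_first ((PySem.Str.split₀ k).headD "")) with
    | none => true
    | some j => decide (i < j)

def pvItemRaises (owner : String) (L : List String) : Bool :=
  owner != "" && !(L.contains owner) &&
  (L.find? (fun k => PySem.Str.isIn owner k || PySem.Str.isIn k owner)).isNone &&
  (PySem.Str.split₀ owner == [] || pvWsBeforeMatch ((PySem.Str.split₀ owner).headD "") L)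

-- Pre_ excludes exactly the inputs on which Python A raises IndexError (see pvItemRaises);
-- on every input A accepts it returns normally and B matches it.
def Pre_resolve_owners_py (action_items : List (List (String × String))) (participants : List String) : Prop :=
  ∀ item ∈ action_items,
    pvItemRaises (PySem.Str.lower ((PySem.Dict.mk item).getD "owner" "")) (participants.map PySem.Str.lower) = false
instance (action_items : List (List (String × String))) (participants : List String) : Decidable (Pre_resolve_owners_py action_items participants) := by unfold Pre_resolve_owners_py; infer_instance

def pvWitness_resolve_owners_py : (List (List (String × String))) × List String :=
  ([[("owner", "bob s"), ("task", "notes")], [("task", "x")]], ["Bob Smith", "Ann Lee"])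

-- A raises IndexError on these inputs (unguarded split()[0] on a whitespace-only owner or
-- participant); B returns, leaving the owner unchanged or using the first-name match.
def Raises_resolve_owners_py (action_items : List (List (String × String))) (participants : List String) : Prop :=
  ∃ item ∈ action_items,
    pvItemRaises (PySem.Str.lower ((PySem.Dict.mk item).getD "owner" "")) (participants.map PySem.Str.lower) = true
instance (action_items : List (List (String × String))) (participants : List String) : Decidable (Raises_resolve_owners_py action_items participants) := by unfold Raises_resolve_owners_py; infer_instance

def pvRaiseWitness_resolve_owners_py : (List (List (String × String))) × List String :=
  ([[("owner", " ")]], ["qq"])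

def pvRaiseWitnessOut_resolve_owners_py : List (List (String × String)) := [[("owner", " ")]]

def Spec_resolve_owners_py (action_items : List (List (String × String))) (participants : List String) (out : List (List (String × String))) : Prop := out = resolve_owners_py_alt action_items participants
instance (action_items : List (List (String × String))) (participants : List String) (out : List (List (String × String))) : Decidable (Spec_resolve_owners_py action_items participants out) := by unfold Spec_resolve_owners_py; infer_instance

-- ===== CLAIM (what is proved, stated in full; the proofs are below) =====
def Claim_equal_resolve_owners_py : Prop := ∀ (action_items : List (List (String × String))) (participants : List String), Dom_resolve_owners_py action_items participants → Pre_resolve_owners_py action_items participants → Spec_resolve_owners_py action_items participants (resolve_owners_py action_items participants)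
def Claim_raises_resolve_owners_py : Prop := (∀ (action_items : List (List (String × String))) (participants : List String), Dom_resolve_owners_py action_items participants → Raises_resolve_owners_py action_items participants → ¬ Pre_resolve_owners_py action_items participants) ∧ (Dom_resolve_owners_py (pvRaiseWitness_resolve_owners_py.1) (pvRaiseWitness_resolve_owners_py.2) ∧ Raises_resolve_owners_py (pvRaiseWitness_resolve_owners_py.1) (pvRaiseWitness_resolve_owners_py.2) ∧ resolve_owners_py_alt (pvRaiseWitness_resolve_owners_py.1) (pvRaiseWitness_resolve_owners_py.2) = pvRaiseWitnessOut_resolve_owners_py)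

-- ===== LEMMAS AND PROOFS =====

-- a non-empty character list is never a substring of the empty string
theorem pvIsIn_nil (l : List Char) (h : l ≠ []) : PySem.Chars.isIn l [] = false := by
  rw [PySem.Chars.isIn_eq_false_iff]
  intro hinf
  exact h (List.eq_nil_of_infix_nil hinf)

-- The scan's first component is the first substring match (A's second tier).
theorem pvScanB_fst (owner owner_first : String) :
    ∀ (l : List (String × String)) (fc : Option String),
      (pvScanB owner owner_first fc l).1
        = (l.find? (fun kv => PySem.Str.isIn owner kv.1 || PySem.Str.isIn kv.1 owner)).map (·.2) := by
  intro l
  induction l with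
  | nil => intro fc; rfl
  | cons kv rest ih =>
    intro fc
    simp only [pvScanB, List.find?_cons]
    cases h : (PySem.Str.isIn owner kv.1 || PySem.Str.isIn kv.1 owner) with
    | true => rfl
    | false => exact ih _

-- B's per-key first-name test equals A's (headD "" form): on a whitespace-only key both
-- are false, since a non-empty owner_first is not a substring of "".
theorem pvPred_eq (owner_first : String) (k : String) :
    ((owner_first != "") && PySem.Str.isIn owner_first ((PySem.Str.split₀ k).headD ""))
      = ((owner_first != "") &&
          (match PySem.Str.split₀ k with
           | [] => false
           | h :: _ => PySem.Str.isIn owner_first h)) := by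
  cases hf : (owner_first != "") with
  | false => simp
  | true =>
    have hne : owner_first.toList ≠ [] := by
      cases owner_first; simp_all
    cases hs : PySem.Str.split₀ k with
    | nil => simp [PySem.Str.isIn, pvIsIn_nil _ hne]
    | cons h t => simp

-- Source B's threaded first_cand update, starting from none, is "some kv.2 iff the per-key
-- first-name test fires".
theorem pvThread_eq (owner_first : String) (kv : String × String) :
    (if (none : Option String).isNone && (owner_first != "") then
       match PySem.Str.split₀ kv.1 with
       | [] => (none : Option String)
       | h :: _ => if PySem.Str.isIn owner_first h then some kv.2 else none
     else none)
    = (if ((owner_first != "") &&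
           (match PySem.Str.split₀ kv.1 with
            | [] => false
            | h :: _ => PySem.Str.isIn owner_first h)) then some kv.2 else none) := by
  cases hf : (owner_first != "") with
  | false => simp
  | true =>
    cases hs : PySem.Str.split₀ kv.1 with
    | nil => simp
    | cons h t =>
      cases hi : PySem.Str.isIn owner_first h <;> simp

-- When no substring match exists, the scan runs to the end and its second component is the
-- threaded first-hit first-name candidate (A's third tier, in A's headD-"" form).
theorem pvScanB_snd (owner owner_first : String) :
    ∀ (l : List (String × String)) (fc : Option String),
      l.find? (fun kv => PySem.Str.isIn owner kv.1 || PySem.Str.isIn kv.1 owner) = none →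
      (pvScanB owner owner_first fc l).2
        = (match fc with
           | some v => some v
           | none =>
             (l.find? (fun kv => (owner_first != "") && PySem.Str.isIn owner_first ((PySem.Str.split₀ kv.1).headD ""))).map (·.2)) := by
  intro l
  induction l with
  | nil => intro fc _; cases fc <;> rfl
  | cons kv rest ih =>
    intro fc hnone
    rw [List.find?_eq_none] at hnone
    have h : (PySem.Str.isIn owner kv.1 || PySem.Str.isIn kv.1 owner) = false := by
      have := hnone kv (by simp)
      simp only [Bool.not_eq_true] at this
      exact this
    have hnone : List.find? (fun kv => PySem.Str.isIn owner kv.1 || PySem.Str.isIn kv.1 owner) rest = none := by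
      rw [List.find?_eq_none]
      intro a ha
      exact hnone a (by simp [ha])
    simp only [pvScanB, h, if_neg Bool.false_ne_true]
    cases fc with
    | some v =>
      rw [ih _ hnone]
      simp
    | none =>
      rw [ih _ hnone, List.find?_cons, pvPred_eq owner_first kv.1, pvThread_eq]  -- find?_cons then predicate bridge
      cases hq : ((owner_first != "") &&
          (match PySem.Str.split₀ kv.1 with
           | [] => false
           | h :: _ => PySem.Str.isIn owner_first h)) with
      | true => simp
      | false => simp

-- A's two sequential find?-scans agree with B's single scan, for any continuation g.
-- (ofA is A's guarded owner_first expression, ofB is Source B's; they are equal.)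
theorem pvBranch_eq (owner ofA ofB : String) (hof : ofA = ofB) (l : List (String × String))
    (g : String → List (String × String)) (dflt : List (String × String))
    :
    (match l.find? (fun kv => PySem.Str.isIn owner kv.1 || PySem.Str.isIn kv.1 owner) with
     | some kv => g kv.2
     | none =>
       match l.find? (fun kv => (ofA != "") && PySem.Str.isIn ofA ((PySem.Str.split₀ kv.1).headD "")) with
       | some kv => g kv.2
       | none => dflt)
    = (match (pvScanB owner ofB none l).1 with
       | some v => g v
       | none =>
         match (pvScanB owner ofB none l).2 with
         | some v => g v
         | none => dflt) := by
  subst hof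
  rw [pvScanB_fst]
  cases hs : l.find? (fun kv => PySem.Str.isIn owner kv.1 || PySem.Str.isIn kv.1 owner) with
  | some kv => rfl
  | none =>
    rw [pvScanB_snd _ _ _ _ hs]
    cases hf : l.find? (fun kv => (ofA != "") && PySem.Str.isIn ofA ((PySem.Str.split₀ kv.1).headD "")) with
    | some kv => rfl
    | none => rfl

-- A's guarded owner_first equals B's headD form (split₀ "" = []).
theorem pvOwnerFirst_eq (owner : String) :
    (if owner ≠ "" then (PySem.Str.split₀ owner).headD "" else "")
      = (PySem.Str.split₀ owner).headD "" := by
  by_cases h : owner = ""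
  · subst h; decide
  · simp [h]

theorem resolve_owners_eq (action_items : List (List (String × String))) (participants : List String) :
    resolve_owners_py action_items participants = resolve_owners_py_alt action_items participants := by
  simp only [resolve_owners_py, resolve_owners_py_alt]
  apply List.map_congr_left
  intro item _
  cases hx : (participants.foldl (fun d p => d.insert (PySem.Str.lower p) p) PySem.Dict.empty).get?
      (PySem.Str.lower ((PySem.Dict.mk item).getD "owner" "")) with
  | some v => rfl
  | none =>
    exact pvBranch_eq
      (PySem.Str.lower ((PySem.Dict.mk item).getD "owner" ""))
      (if PySem.Str.lower ((PySem.Dict.mk item).getD "owner" "") ≠ "" then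
        (PySem.Str.split₀ (PySem.Str.lower ((PySem.Dict.mk item).getD "owner" ""))).headD "" else "")
      ((PySem.Str.split₀ (PySem.Str.lower ((PySem.Dict.mk item).getD "owner" ""))).headD "")
      (pvOwnerFirst_eq _)
      (participants.foldl (fun d p => d.insert (PySem.Str.lower p) p) PySem.Dict.empty).items
      (fun v => ((PySem.Dict.mk item).insert "owner" v).items)
      item


-- ===== VERDICT (by name: the statement is the Claim_ definition above) =====
theorem resolve_owners_py_spec : Claim_equal_resolve_owners_py := by
  intro ai ps _ _
  unfold Spec_resolve_owners_py
  exact resolve_owners_eq ai ps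

theorem resolve_owners_py_raises : Claim_raises_resolve_owners_py := by
  unfold Claim_raises_resolve_owners_py
  refine ⟨?_, by decide⟩
  intro ai ps _ ⟨item, hmem, hr⟩ hpre
  exact absurd (hpre item hmem) (by simp [hr])

-- self-check: at the raise witness, Pre_ indeed fails (uses the raises theorem above)
theorem pvRaiseWitness_ok :
    ¬ Pre_resolve_owners_py pvRaiseWitness_resolve_owners_py.1 pvRaiseWitness_resolve_owners_py.2 := by
  have h := resolve_owners_py_raises
  unfold Claim_raises_resolve_owners_py at h
  exact h.1 _ _ (by decide) h.2.2.1
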